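-- pv_equiv track=rewrite | github.com/ranjan210/digital-encoder | main.py | returnNRZ
-- ===== SOURCE A (Python) =====
-- def appendToPoint(pointsX,pointsY,currX,currY):
--     pointsX.append(currX)
--     pointsY.append(currY)
--
-- def returnNRZ(inputStr):
--     pointsX = []
--     pointsY = []
--     currX = 0
--     currY = 0
--     appendToPoint(pointsX,pointsY,currX,currY)
--
--     for a in inputStr:
--         if a=="1":
--             currY=1
--         if a=="0":
--             currY=0
--         appendToPoint(pointsX,pointsY,currX,currY)
--         currX+=1
--         appendToPoint(pointsX,pointsY,currX,currY)
--
--     return pointsX,pointsY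
-- ===== SOURCE B (Python) =====
-- def returnNRZ(inputStr):
--     # one pass to compute the NRZ level after each bit, then flatten to coordinates
--     levels = []
--     y = 0
--     for a in inputStr:
--         if a == "1":
--             y = 1
--         elif a == "0":
--             y = 0
--         levels.append(y)
--     pointsX = [0] + [x for i in range(len(levels)) for x in (i, i + 1)]
--     pointsY = [0] + [v for y in levels for v in (y, y)]
--     return pointsX, pointsY
-- ===== Notes on version B (the rewrite author's own statement) =====
-- stated objective: alternative
-- what changed: Instead of one interleaved pass appending x and y points together, B first computes the NRZ level list in one pass and then builds pointsX and pointsY by flattening comprehensions.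
import Mathlib
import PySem

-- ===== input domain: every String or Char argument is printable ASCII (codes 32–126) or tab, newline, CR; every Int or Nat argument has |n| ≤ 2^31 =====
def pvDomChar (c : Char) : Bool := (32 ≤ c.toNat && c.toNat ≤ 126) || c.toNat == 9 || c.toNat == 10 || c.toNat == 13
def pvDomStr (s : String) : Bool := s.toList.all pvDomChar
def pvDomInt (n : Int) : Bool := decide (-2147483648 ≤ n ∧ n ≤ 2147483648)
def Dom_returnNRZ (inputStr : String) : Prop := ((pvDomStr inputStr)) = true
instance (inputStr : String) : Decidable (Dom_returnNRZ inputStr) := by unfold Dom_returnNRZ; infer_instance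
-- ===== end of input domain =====

-- B replaces A's single interleaved point-appending loop with a level-computation pass plus
-- two flattening comprehensions (objective: alternative decomposition, same O(n) cost).

-- ===== PORT A =====
-- A's loop: state (pointsX, pointsY, currX, currY); appendToPoint inlined as list append.
def returnNRZ_loop : List Char → List Int → List Int → Int → Int → List Int × List Int
  | [], px, py, _, _ => (px, py)
  | a :: rest, px, py, cx, cy =>
    let cy1 := if a = '1' then 1 else cy
    let cy2 := if a = '0' then 0 else cy1
    returnNRZ_loop rest ((px ++ [cx]) ++ [cx + 1]) ((py ++ [cy2]) ++ [cy2]) (cx + 1) cy2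

def returnNRZ (inputStr : String) : List Int × List Int :=
  returnNRZ_loop inputStr.toList ([] ++ [0]) ([] ++ [0]) 0 0

-- ===== PORT B =====
-- B's first loop: running level y, appending the current level each step.
def returnNRZ_levels : List Char → Int → List Int
  | [], _ => []
  | a :: rest, y =>
    let y' := if a = '1' then 1 else if a = '0' then 0 else y
    y' :: returnNRZ_levels rest y'

def returnNRZ_alt (inputStr : String) : List Int × List Int :=
  let levels := returnNRZ_levels inputStr.toList 0
  let pointsX : List Int := 0 :: (List.range levels.length).flatMap (fun i : Nat => [(i : Int), (i : Int) + 1])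
  let pointsY : List Int := 0 :: levels.flatMap (fun y => [y, y])
  (pointsX, pointsY)

-- ===== PRECONDITION & SPEC =====
def Spec_returnNRZ (inputStr : String) (out : List Int × List Int) : Prop := out = returnNRZ_alt inputStr
instance (inputStr : String) (out : List Int × List Int) : Decidable (Spec_returnNRZ inputStr out) := by unfold Spec_returnNRZ; infer_instance

-- ===== CLAIM (what is proved, stated in full; the proofs are below) =====
def Claim_equal_returnNRZ : Prop := ∀ (inputStr : String), Dom_returnNRZ inputStr → Spec_returnNRZ inputStr (returnNRZ inputStr)

-- ===== LEMMAS AND PROOFS =====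

theorem returnNRZ_levels_length (cs : List Char) (y : Int) :
    (returnNRZ_levels cs y).length = cs.length := by
  induction cs generalizing y with
  | nil => rfl
  | cons a rest ih => simp [returnNRZ_levels, ih]

theorem returnNRZ_loop_eq (cs : List Char) (px py : List Int) (cx cy : Int) :
    returnNRZ_loop cs px py cx cy =
      (px ++ (List.range cs.length).flatMap (fun i : Nat => [cx + (i : Int), cx + (i : Int) + 1]),
       py ++ (returnNRZ_levels cs cy).flatMap (fun y => [y, y])) := by
  induction cs generalizing px py cx cy with
  | nil => simp [returnNRZ_loop, returnNRZ_levels]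
  | cons a rest ih =>
    have hy : (if a = '0' then (0 : Int) else if a = '1' then 1 else cy)
            = (if a = '1' then 1 else if a = '0' then 0 else cy) := by
      by_cases h0 : a = '0' <;> by_cases h1 : a = '1' <;> simp_all
    simp only [returnNRZ_loop, returnNRZ_levels, ih, List.length_cons]
    rw [List.range_succ_eq_map, Prod.ext_iff]
    refine ⟨?_, ?_⟩
    · rw [List.flatMap_cons, List.flatMap_map]
      have h : (fun i : Nat => [cx + (↑(Nat.succ i) : Int), cx + (↑(Nat.succ i) : Int) + 1])
             = (fun i : Nat => [cx + 1 + (i : Int), cx + 1 + (i : Int) + 1]) := by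
        funext i
        simp [Nat.succ_eq_add_one]
        omega
      rw [h]
      simp
    · rw [← hy]
      simp [List.flatMap_cons]

-- ===== VERDICT (by name: the statement is the Claim_ definition above) =====
theorem returnNRZ_spec : Claim_equal_returnNRZ := by
  intro s _
  unfold Spec_returnNRZ returnNRZ returnNRZ_alt
  simp [returnNRZ_loop_eq, returnNRZ_levels_length]
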